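-- pv_equiv track=rewrite | github.com/NichakornT/TestGit04 | badgenius/app.py | convert_to_original
-- ===== SOURCE A (Python) =====
-- def convert_to_original(reduced_text):
--     reverse_substitution_table = {
--         'A': 'aa', 'B': 'ab', 'C': 'ac', 'D': 'ad',
--         'E': 'ba', 'F': 'bb', 'G': 'bc', 'H': 'bd',
--         'I': 'ca', 'J': 'cb', 'K': 'cc', 'L': 'cd',
--         'M': 'da', 'N': 'db', 'O': 'dc', 'P': 'dd'
--     }
--     original_text = ''
--
--     for char in reduced_text:
--         if char in reverse_substitution_table:
--             original_text += reverse_substitution_table[char]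
--
--     return original_text
-- ===== SOURCE B (Python) =====
-- def convert_to_original(reduced_text):
--     pieces = []
--     for char in reduced_text:
--         idx = ord(char) - ord('A')
--         if 0 <= idx < 16:
--             pieces.append('abcd'[idx // 4] + 'abcd'[idx % 4])
--     return ''.join(pieces)
-- ===== Notes on version B (the rewrite author's own statement) =====
-- stated objective: idiomatic
-- what changed: Replaces the 16-entry reverse-substitution dict with a closed-form base-4 decode of the letter's alphabet offset (high digit then low digit indexed into the four-letter alphabet), collecting pieces and joining once instead of repeated string concatenation.
import Mathlib
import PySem

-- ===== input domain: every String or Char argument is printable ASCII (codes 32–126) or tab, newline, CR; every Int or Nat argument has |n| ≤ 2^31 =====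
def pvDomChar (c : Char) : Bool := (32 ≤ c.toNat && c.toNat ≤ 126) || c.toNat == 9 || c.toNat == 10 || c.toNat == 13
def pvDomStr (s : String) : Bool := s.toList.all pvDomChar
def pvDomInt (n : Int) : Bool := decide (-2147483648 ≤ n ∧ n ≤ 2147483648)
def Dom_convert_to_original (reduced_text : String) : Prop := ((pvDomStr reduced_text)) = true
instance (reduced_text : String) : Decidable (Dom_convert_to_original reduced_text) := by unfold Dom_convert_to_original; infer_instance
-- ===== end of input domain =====

-- B replaces A's 16-entry reverse-substitution dict by a closed-form base-4 decode of the
-- letter's alphabet position (idiomatic; same O(n) cost).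

-- ===== PORT A =====
-- A's reverse_substitution_table (built once in the Python function body)
def revSubstitutionTable : PySem.Dict Char (List Char) :=
  PySem.Dict.ofList
    [('A', ['a','a']), ('B', ['a','b']), ('C', ['a','c']), ('D', ['a','d']),
     ('E', ['b','a']), ('F', ['b','b']), ('G', ['b','c']), ('H', ['b','d']),
     ('I', ['c','a']), ('J', ['c','b']), ('K', ['c','c']), ('L', ['c','d']),
     ('M', ['d','a']), ('N', ['d','b']), ('O', ['d','c']), ('P', ['d','d'])]

def convert_to_original (reduced_text : String) : String :=
  String.ofList (reduced_text.toList.foldl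
    (fun original_text char =>
      match revSubstitutionTable.get? char with   -- 'char in table' + 'table[char]'
      | some v => original_text ++ v
      | none => original_text)
    [])

-- ===== PORT B =====
def convert_to_original_alt (reduced_text : String) : String :=
  String.ofList (reduced_text.toList.foldl
    (fun pieces char =>
      let idx : Int := (char.toNat : Int) - 65    -- ord(char) - ord('A')
      if 0 ≤ idx ∧ idx < 16 then
        pieces ++ [PySem.List.pyGetD ['a','b','c','d'] (PySem.Int.floordiv idx 4) 'a',
                   PySem.List.pyGetD ['a','b','c','d'] (PySem.Int.mod idx 4) 'a']
      else pieces)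
    [])

-- ===== PRECONDITION & SPEC =====
def Spec_convert_to_original (reduced_text : String) (out : String) : Prop := out = convert_to_original_alt reduced_text
instance (reduced_text : String) (out : String) : Decidable (Spec_convert_to_original reduced_text out) := by unfold Spec_convert_to_original; infer_instance

-- ===== CLAIM (what is proved, stated in full; the proofs are below) =====
def Claim_equal_convert_to_original : Prop := ∀ (reduced_text : String), Dom_convert_to_original reduced_text → Spec_convert_to_original reduced_text (convert_to_original reduced_text)

-- ===== LEMMAS AND PROOFS =====
set_option maxHeartbeats 1000000 in
theorem revTable_get?_none (c : Char) (h : ¬ (65 ≤ c.toNat ∧ c.toNat ≤ 80)) :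
    revSubstitutionTable.get? c = none := by
  rw [show revSubstitutionTable = PySem.Dict.mk
    [('A', ['a','a']), ('B', ['a','b']), ('C', ['a','c']), ('D', ['a','d']),
     ('E', ['b','a']), ('F', ['b','b']), ('G', ['b','c']), ('H', ['b','d']),
     ('I', ['c','a']), ('J', ['c','b']), ('K', ['c','c']), ('L', ['c','d']),
     ('M', ['d','a']), ('N', ['d','b']), ('O', ['d','c']), ('P', ['d','d'])] from by decide]
  rw [PySem.Dict.get?_eq_none_iff_not_mem_keys]
  intro hc
  simp only [PySem.Dict.keys_mk, List.map_cons, List.map_nil, List.mem_cons,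
    List.not_mem_nil, or_false] at hc
  rcases hc with h' | h' | h' | h' | h' | h' | h' | h' | h' | h' | h' | h' | h' | h' | h' | h' <;>
    (subst h'; exact h (by decide))

theorem step_eq (acc : List Char) (c : Char) :
    (match revSubstitutionTable.get? c with
     | some v => acc ++ v
     | none => acc) =
    (let idx : Int := (c.toNat : Int) - 65
     if 0 ≤ idx ∧ idx < 16 then
       acc ++ [PySem.List.pyGetD ['a','b','c','d'] (PySem.Int.floordiv idx 4) 'a',
               PySem.List.pyGetD ['a','b','c','d'] (PySem.Int.mod idx 4) 'a']
     else acc) := by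
  by_cases h : 65 ≤ c.toNat ∧ c.toNat ≤ 80
  · obtain ⟨h1, h2⟩ := h
    rw [← Char.ofNat_toNat c]
    interval_cases c.toNat <;> rfl
  · rw [revTable_get?_none c h]
    have hg : ¬ (0 ≤ (c.toNat : Int) - 65 ∧ (c.toNat : Int) - 65 < 16) := by omega
    simp only [hg, if_false]

-- ===== VERDICT (by name: the statement is the Claim_ definition above) =====
theorem convert_to_original_spec : Claim_equal_convert_to_original := by
  intro s _
  unfold Spec_convert_to_original convert_to_original convert_to_original_alt
  congr 1
  apply PySem.List.foldl_congr_mem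
  intro acc c _
  exact step_eq acc c
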